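-- pv_equiv track=rewrite | github.com/quantum-pecos/PECOS | python/quantum-pecos/src/pecos/qeclib/vis/plot_patch.py | build_adjacency_graph
-- ===== SOURCE A (Python) =====
-- from collections import defaultdict
--
-- def build_adjacency_graph(polygons):
--     """
--     Build an adjacency graph for polygons that share edges.
--
--     Parameters:
--         polygons (list): List of polygons as lists of (x, y) tuples.
--
--     Returns:
--         dict: Adjacency graph.
--     """
--     graph = defaultdict(list)
--     for i, poly1 in enumerate(polygons):
--         for j, poly2 in enumerate(polygons):
--             if i != j:
--                 edges1 = {
--                     (poly1[k], poly1[(k + 1) % len(poly1)]) for k in range(len(poly1))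
--                 }
--                 edges2 = {
--                     (poly2[k], poly2[(k + 1) % len(poly2)]) for k in range(len(poly2))
--                 }
--                 if any(edge in edges2 or edge[::-1] in edges2 for edge in edges1):
--                     graph[i].append(j)
--     return graph
-- ===== SOURCE B (Python) =====
-- def build_adjacency_graph(polygons):
--     """Edge-indexed rebuild: bucket polygon indices by normalized edge, then
--     connect all polygons sharing a bucket; O(total edges) instead of O(P^2 * E)."""
--     edge_map = {}
--     for i, poly in enumerate(polygons):
--         n = len(poly)
--         for k in range(n):
--             a, b = poly[k], poly[(k + 1) % n]
--             key = (a, b) if a <= b else (b, a)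
--             edge_map.setdefault(key, set()).add(i)
--     neighbors = {}
--     for group in edge_map.values():
--         for i in group:
--             for j in group:
--                 if i != j:
--                     neighbors.setdefault(i, set()).add(j)
--     return {i: sorted(neighbors[i]) for i in sorted(neighbors)}
-- ===== Notes on version B (the rewrite author's own statement) =====
-- stated objective: faster
-- what changed: Replaces the all-pairs scan that rebuilds both edge sets for every (i,j) pair with a single pass that buckets polygon indices by normalized (sorted-endpoint) edge in a dict and connects polygons within each bucket, sorting keys and neighbor lists at the end.
import Mathlib
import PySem

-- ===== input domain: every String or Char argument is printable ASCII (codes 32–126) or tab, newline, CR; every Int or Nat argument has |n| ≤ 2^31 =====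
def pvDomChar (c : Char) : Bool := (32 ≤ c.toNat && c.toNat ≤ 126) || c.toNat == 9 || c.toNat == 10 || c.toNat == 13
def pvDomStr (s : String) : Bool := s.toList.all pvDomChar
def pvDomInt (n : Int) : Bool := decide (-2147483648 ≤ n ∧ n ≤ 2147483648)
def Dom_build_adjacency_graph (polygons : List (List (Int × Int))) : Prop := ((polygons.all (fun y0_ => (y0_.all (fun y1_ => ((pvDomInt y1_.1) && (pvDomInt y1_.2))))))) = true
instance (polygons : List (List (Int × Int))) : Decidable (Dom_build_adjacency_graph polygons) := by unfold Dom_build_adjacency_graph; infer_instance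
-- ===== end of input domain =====

-- B replaces A's all-pairs scan (which rebuilds both edge sets for every ordered
-- pair) by a single dict bucketing polygon indices per normalized edge; the two
-- return values are proved equal on every input (both functions are total).

-- ===== PORT A =====
-- the set comprehension {(poly[k], poly[(k+1) % len(poly)]) for k in range(len(poly))}
def pvEdgeSet (poly : List (Int × Int)) : PySem.Set ((Int × Int) × (Int × Int)) :=
  PySem.Set.ofList ((PySem.List.pyRange 0 poly.length 1).map
    (fun k => (PySem.List.pyGetD poly k (0, 0),
               PySem.List.pyGetD poly (PySem.Int.mod (k + 1) poly.length) (0, 0))))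

def build_adjacency_graph (polygons : List (List (Int × Int))) : List (Int × List Int) :=
  ((PySem.List.enumerate polygons).foldl (fun graph p =>
    (PySem.List.enumerate polygons).foldl (fun graph q =>
      if p.1 ≠ q.1 then
        let edges1 := pvEdgeSet p.2
        let edges2 := pvEdgeSet q.2
        if edges1.any (fun e => PySem.Set.contains edges2 e || PySem.Set.contains edges2 (e.2, e.1)) then
          graph.insert p.1 (graph.getD p.1 [] ++ [q.1])
        else graph
      else graph) graph)
    (PySem.Dict.empty : PySem.Dict Int (List Int))).items

-- ===== PORT B =====
-- key = (a, b) if a <= b else (b, a)   (Python tuple <= is lexicographic)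
def pvNormKey (a b : Int × Int) : (Int × Int) × (Int × Int) :=
  if a.1 < b.1 ∨ (a.1 = b.1 ∧ a.2 ≤ b.2) then (a, b) else (b, a)

def build_adjacency_graph_alt (polygons : List (List (Int × Int))) : List (Int × List Int) :=
  let edge_map : PySem.Dict ((Int × Int) × (Int × Int)) (PySem.Set Int) :=
    (PySem.List.enumerate polygons).foldl (fun em p =>
      (PySem.List.pyRange 0 p.2.length 1).foldl (fun em k =>
        let a := PySem.List.pyGetD p.2 k (0, 0)
        let b := PySem.List.pyGetD p.2 (PySem.Int.mod (k + 1) p.2.length) (0, 0)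
        let key := pvNormKey a b
        em.insert key (PySem.Set.add (em.getD key PySem.Set.empty) p.1)) em)
      PySem.Dict.empty
  let neighbors : PySem.Dict Int (PySem.Set Int) :=
    edge_map.values.foldl (fun nb group =>
      group.foldl (fun nb i =>
        group.foldl (fun nb j =>
          if i ≠ j then nb.insert i (PySem.Set.add (nb.getD i PySem.Set.empty) j) else nb) nb) nb)
      PySem.Dict.empty
  (PySem.List.sorted neighbors.keys (fun x => x) false).map
    (fun i => (i, PySem.List.sorted (neighbors.getD i PySem.Set.empty) (fun x => x) false))

-- ===== PRECONDITION & SPEC =====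
def Spec_build_adjacency_graph (polygons : List (List (Int × Int))) (out : List (Int × List Int)) : Prop := out = build_adjacency_graph_alt polygons
instance (polygons : List (List (Int × Int))) (out : List (Int × List Int)) : Decidable (Spec_build_adjacency_graph polygons out) := by unfold Spec_build_adjacency_graph; infer_instance

-- ===== CLAIM (what is proved, stated in full; the proofs are below) =====
def Claim_equal_build_adjacency_graph : Prop := ∀ (polygons : List (List (Int × Int))), Dom_build_adjacency_graph polygons → Spec_build_adjacency_graph polygons (build_adjacency_graph polygons)

-- ===== LEMMAS AND PROOFS =====

-- the directed edge list of a polygon (the list the set comprehension ranges over)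
def pvEdgeList (poly : List (Int × Int)) : List ((Int × Int) × (Int × Int)) :=
  (PySem.List.pyRange 0 poly.length 1).map
    (fun k => (PySem.List.pyGetD poly k (0, 0),
               PySem.List.pyGetD poly (PySem.Int.mod (k + 1) poly.length) (0, 0)))

def pvPoly (polygons : List (List (Int × Int))) (i : Int) : List (Int × Int) :=
  PySem.List.pyGetD polygons i []

-- A's per-pair boolean condition (as written in port A)
def pvCondA (p1 p2 : List (Int × Int)) : Bool :=
  (pvEdgeSet p1).any (fun e =>
    PySem.Set.contains (pvEdgeSet p2) e || PySem.Set.contains (pvEdgeSet p2) (e.2, e.1))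

def pvSharesB (polygons : List (List (Int × Int))) (i j : Int) : Bool :=
  (pvEdgeList (pvPoly polygons i)).any (fun e1 =>
    (pvEdgeList (pvPoly polygons j)).any (fun e2 =>
      pvNormKey e1.1 e1.2 == pvNormKey e2.1 e2.2))

def pvNbr (polygons : List (List (Int × Int))) (i : Int) : List Int :=
  (PySem.List.pyRange 0 polygons.length 1).filter
    (fun j => decide (i ≠ j) && pvSharesB polygons i j)

-- the common reference value both ports are proved equal to
def pvSpec (polygons : List (List (Int × Int))) : List (Int × List Int) :=
  (PySem.List.pyRange 0 polygons.length 1).filterMap (fun i =>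
    if pvNbr polygons i = [] then none else some (i, pvNbr polygons i))

-- the flat (normalized-edge, polygon-index) pair list B's edge_map loop processes
def pvPairs (polygons : List (List (Int × Int))) : List (((Int × Int) × (Int × Int)) × Int) :=
  (PySem.List.enumerate polygons).flatMap (fun p =>
    (pvEdgeList p.2).map (fun e => (pvNormKey e.1 e.2, p.1)))

theorem pvNormKey_eq_iff (a b c d : Int × Int) :
    pvNormKey c d = pvNormKey a b ↔ ((c, d) = (a, b) ∨ (c, d) = (b, a)) := by
  obtain ⟨a1, a2⟩ := a; obtain ⟨b1, b2⟩ := b; obtain ⟨c1, c2⟩ := c; obtain ⟨d1, d2⟩ := d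
  simp only [pvNormKey, Prod.mk.injEq]
  split_ifs <;> simp only [Prod.mk.injEq] <;> omega

theorem pvSet_contains_ofList {α : Type} [BEq α] [LawfulBEq α] (l : List α) (x : α) :
    PySem.Set.contains (PySem.Set.ofList l) x = true ↔ x ∈ l := by
  simp [PySem.Set.contains, PySem.Set.mem_ofList]

theorem pvCondA_eq (p1 p2 : List (Int × Int)) :
    pvCondA p1 p2 = (pvEdgeList p1).any (fun e1 =>
      (pvEdgeList p2).any (fun e2 => pvNormKey e1.1 e1.2 == pvNormKey e2.1 e2.2)) := by
  have hset : ∀ p, pvEdgeSet p = PySem.Set.ofList (pvEdgeList p) := fun _ => rfl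
  rw [Bool.eq_iff_iff]
  simp only [pvCondA, hset, List.any_eq_true, Bool.or_eq_true, beq_iff_eq,
    PySem.Set.mem_ofList, pvSet_contains_ofList]
  constructor
  · rintro ⟨e, he, h | h⟩
    · exact ⟨e, he, e, h, rfl⟩
    · exact ⟨e, he, (e.2, e.1), h, ((pvNormKey_eq_iff e.2 e.1 e.1 e.2).2 (Or.inr rfl))⟩
  · rintro ⟨⟨x1, y1⟩, he1, ⟨x2, y2⟩, he2, hk⟩
    rcases (pvNormKey_eq_iff x2 y2 x1 y1).1 hk with h | h <;>
      simp only [Prod.mk.injEq] at h <;> obtain ⟨h1, h2⟩ := h <;> subst h1 <;> subst h2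
    · exact ⟨(x1, y1), he1, Or.inl he2⟩
    · exact ⟨(x1, y1), he1, Or.inr he2⟩

-- collapsing A's nested if into one boolean condition
theorem pvIfIf (A : Prop) [Decidable A] (B : Bool) {α : Type} (x y : α) :
    (if A then (if B = true then x else y) else y)
    = (if (decide A && B) = true then x else y) := by
  by_cases hA : A <;> cases B <;> simp [hA]

-- a conditional-append loop over one dict key collects the passing elements
theorem pvAppend_fold {β : Type} (key : Int) (c : β → Bool) (pr : β → Int) :
    ∀ (l : List β) (d : PySem.Dict Int (List Int)),
    l.foldl (fun g q => if c q = true then g.insert key (g.getD key [] ++ [pr q]) else g) d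
    = (if (l.filter c) = [] then d
       else d.insert key (d.getD key [] ++ (l.filter c).map pr)) := by
  intro l
  induction l with
  | nil => intro d; simp
  | cons q t ih =>
    intro d
    rw [List.foldl_cons, List.filter_cons]
    cases hc : c q
    · simp only [Bool.false_eq_true, if_false]
      exact ih d
    · simp only [if_true]
      rw [ih]
      by_cases ht : t.filter c = []
      · simp [ht]
      · rw [if_neg ht, if_neg (List.cons_ne_nil q (t.filter c)),
          PySem.Dict.getD_insert_self, PySem.Dict.insert_insert_self, List.map_cons,
          List.append_assoc, List.singleton_append]

-- A's inner loop (over j) appends the indices passing the condition to graph[i]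
theorem pvA_inner (p : Int × List (Int × Int)) :
    ∀ (l : List (Int × List (Int × Int))) (d : PySem.Dict Int (List Int)),
    l.foldl (fun graph q =>
      if p.1 ≠ q.1 then
        let edges1 := pvEdgeSet p.2
        let edges2 := pvEdgeSet q.2
        if edges1.any (fun e => PySem.Set.contains edges2 e || PySem.Set.contains edges2 (e.2, e.1)) then
          graph.insert p.1 (graph.getD p.1 [] ++ [q.1])
        else graph
      else graph) d
    = (if (l.filter (fun q => decide (p.1 ≠ q.1) && pvCondA p.2 q.2)) = [] then d
       else d.insert p.1 (d.getD p.1 [] ++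
         ((l.filter (fun q => decide (p.1 ≠ q.1) && pvCondA p.2 q.2)).map (·.1)))) := by
  intro l d
  rw [show (fun (graph : PySem.Dict Int (List Int)) (q : Int × List (Int × Int)) =>
      if p.1 ≠ q.1 then
        let edges1 := pvEdgeSet p.2
        let edges2 := pvEdgeSet q.2
        if edges1.any (fun e => PySem.Set.contains edges2 e || PySem.Set.contains edges2 (e.2, e.1)) then
          graph.insert p.1 (graph.getD p.1 [] ++ [q.1])
        else graph
      else graph)
    = (fun (g : PySem.Dict Int (List Int)) (q : Int × List (Int × Int)) =>
        if (decide (p.1 ≠ q.1) && pvCondA p.2 q.2) = true then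
          g.insert p.1 (g.getD p.1 [] ++ [q.1]) else g)
    from funext fun g => funext fun q =>
      pvIfIf (p.1 ≠ q.1) (pvCondA p.2 q.2) (g.insert p.1 (g.getD p.1 [] ++ [q.1])) g]
  exact pvAppend_fold p.1 (fun q => decide (p.1 ≠ q.1) && pvCondA p.2 q.2) (fun q => q.1) l d

-- A's outer loop: over fresh distinct keys it appends one item per nonempty neighbor list
def pvF (polygons : List (List (Int × Int))) (p : Int × List (Int × Int)) :
    List (Int × List (Int × Int)) :=
  (PySem.List.enumerate polygons).filter (fun q => decide (p.1 ≠ q.1) && pvCondA p.2 q.2)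

theorem pvA_outer (polygons : List (List (Int × Int))) :
    ∀ (l : List (Int × List (Int × Int))) (d : PySem.Dict Int (List Int)),
    (∀ p ∈ l, d.contains p.1 = false) → (l.map (·.1)).Nodup →
    (l.foldl (fun g p => if pvF polygons p = [] then g
        else g.insert p.1 (g.getD p.1 [] ++ (pvF polygons p).map (·.1))) d).items
    = d.items ++ l.filterMap (fun p =>
        if pvF polygons p = [] then none else some (p.1, (pvF polygons p).map (·.1))) := by
  intro l
  induction l with
  | nil => intro d _ _; simp
  | cons p t ih =>
    intro d hfresh hnd
    simp only [List.map_cons, List.nodup_cons] at hnd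
    rw [List.foldl_cons]
    by_cases hF : pvF polygons p = []
    · rw [if_pos hF, ih d (fun q hq => hfresh q (List.mem_cons_of_mem _ hq)) hnd.2]
      simp [hF]
    · rw [if_neg hF]
      have hget : d.getD p.1 [] = [] :=
        PySem.Dict.getD_of_not_contains d [] (hfresh p List.mem_cons_self)
      rw [hget, List.nil_append]
      have hone := PySem.Dict.items_foldl_insert_fresh [p] (·.1)
        (fun q => (pvF polygons q).map (·.1)) d
        (by
          intro a ha
          rw [List.mem_singleton.mp ha]
          exact hfresh p List.mem_cons_self)
        (by simp)
      simp only [List.foldl_cons, List.foldl_nil, List.map_cons, List.map_nil] at hone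
      rw [ih (d.insert p.1 ((pvF polygons p).map (·.1)))
        (by
          intro q hq
          rw [PySem.Dict.contains_insert]
          have h1 : q.1 ≠ p.1 := by
            intro h
            exact hnd.1 (h ▸ List.mem_map_of_mem hq)
          simp [h1, hfresh q (List.mem_cons_of_mem _ hq)])
        hnd.2, hone]
      simp [hF]

theorem pvA_eq (polygons : List (List (Int × Int))) :
    build_adjacency_graph polygons = pvSpec polygons := by
  unfold build_adjacency_graph
  rw [show (fun (graph : PySem.Dict Int (List Int)) (p : Int × List (Int × Int)) =>
      (PySem.List.enumerate polygons).foldl (fun graph q =>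
        if p.1 ≠ q.1 then
          let edges1 := pvEdgeSet p.2
          let edges2 := pvEdgeSet q.2
          if edges1.any (fun e => PySem.Set.contains edges2 e || PySem.Set.contains edges2 (e.2, e.1)) then
            graph.insert p.1 (graph.getD p.1 [] ++ [q.1])
          else graph
        else graph) graph)
    = (fun (g : PySem.Dict Int (List Int)) (p : Int × List (Int × Int)) =>
        if pvF polygons p = [] then g
        else g.insert p.1 (g.getD p.1 [] ++ (pvF polygons p).map (·.1)))
    from funext fun g => funext fun p => pvA_inner p (PySem.List.enumerate polygons) g]
  rw [pvA_outer polygons (PySem.List.enumerate polygons) PySem.Dict.empty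
    (fun p _ => rfl)
    (by
      rw [show (PySem.List.enumerate polygons).map (·.1)
          = PySem.List.pyRange 0 (0 + (polygons.length : Int)) 1
        from PySem.List.map_fst_enumerate polygons 0]
      exact PySem.List.nodup_pyRange_one 0 (0 + (polygons.length : Int)))]
  rw [show (PySem.Dict.empty : PySem.Dict Int (List Int)).items = [] from rfl, List.nil_append]
  rw [PySem.List.enumerate_eq_map_pyRange polygons [], List.filterMap_map]
  unfold pvSpec
  refine List.filterMap_congr ?_
  intro j hj
  have hFj : ((pvF polygons (j, PySem.List.pyGetD polygons j [])).map (·.1))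
      = pvNbr polygons j := by
    unfold pvF pvNbr
    rw [PySem.List.enumerate_eq_map_pyRange polygons [], List.filter_map, List.map_map]
    rw [List.filter_congr (l := PySem.List.pyRange 0 (PySem.List.len polygons) 1)
      (q := fun j' => decide (j ≠ j') && pvSharesB polygons j j')
      (by
        intro j' _
        show (decide (j ≠ j') && pvCondA (PySem.List.pyGetD polygons j [])
          (PySem.List.pyGetD polygons j' [])) = _
        rw [pvCondA_eq]
        rfl)]
    have hlen : PySem.List.len polygons = (polygons.length : Int) := by
      simp [PySem.List.len]
    rw [hlen]
    exact List.map_id' _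
  have hnil : (pvF polygons (j, PySem.List.pyGetD polygons j []) = [])
      ↔ (pvNbr polygons j = []) := by
    rw [← hFj, List.map_eq_nil_iff]
  show (if pvF polygons (j, PySem.List.pyGetD polygons j []) = [] then none
      else some ((j, PySem.List.pyGetD polygons j []).1,
        (pvF polygons (j, PySem.List.pyGetD polygons j [])).map (·.1)))
    = _
  by_cases h : pvF polygons (j, PySem.List.pyGetD polygons j []) = []
  · rw [if_pos h, if_pos (hnil.mp h)]
  · rw [if_neg h, if_neg (fun hh => h (hnil.mpr hh)), hFj]

-- B-side: the generic dict-of-sets accumulation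
theorem pvUpd_getD {κ : Type} [BEq κ] [LawfulBEq κ] :
    ∀ (l : List (κ × Int)) (d : PySem.Dict κ (PySem.Set Int)) (k : κ),
    (l.foldl (fun d kv => d.insert kv.1 (PySem.Set.add (d.getD kv.1 PySem.Set.empty) kv.2)) d).getD k PySem.Set.empty
    = PySem.Set.update (d.getD k PySem.Set.empty) ((l.filter (fun kv => kv.1 == k)).map (·.2)) := by
  intro l
  induction l with
  | nil => intro d k; simp [PySem.Set.update]
  | cons kv t ih =>
    intro d k
    rw [List.foldl_cons, List.filter_cons, ih]
    by_cases h : kv.1 = k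
    · subst h
      rw [PySem.Dict.getD_insert_self, if_pos (by simp), List.map_cons]
      rfl
    · rw [PySem.Dict.getD_insert_of_ne d _ _ (Ne.symm h), if_neg (by simpa using h)]

theorem pvUpd_getD_mem {κ : Type} [BEq κ] [LawfulBEq κ] (l : List (κ × Int)) (k : κ) (j : Int) :
    (j ∈ (l.foldl (fun d kv => d.insert kv.1 (PySem.Set.add (d.getD kv.1 PySem.Set.empty) kv.2))
        (PySem.Dict.empty : PySem.Dict κ (PySem.Set Int))).getD k PySem.Set.empty) ↔ (k, j) ∈ l := by
  rw [pvUpd_getD l PySem.Dict.empty k,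
    show (PySem.Dict.empty : PySem.Dict κ (PySem.Set Int)).getD k PySem.Set.empty
      = PySem.Set.empty from rfl,
    PySem.Set.mem_update]
  constructor
  · rintro (hj | hj)
    · cases hj
    · rw [List.mem_map] at hj
      obtain ⟨⟨k', j'⟩, hm, hj⟩ := hj
      rw [List.mem_filter] at hm
      obtain ⟨hm, hk⟩ := hm
      simp only [beq_iff_eq] at hk
      subst hk
      subst hj
      exact hm
  · intro hm
    right
    rw [List.mem_map]
    exact ⟨(k, j), List.mem_filter.mpr ⟨hm, by simp⟩, rfl⟩

theorem pvUpd_getD_nodup {κ : Type} [BEq κ] [LawfulBEq κ] (l : List (κ × Int)) (k : κ) :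
    ((l.foldl (fun d kv => d.insert kv.1 (PySem.Set.add (d.getD kv.1 PySem.Set.empty) kv.2))
        (PySem.Dict.empty : PySem.Dict κ (PySem.Set Int))).getD k PySem.Set.empty).Nodup := by
  rw [pvUpd_getD l PySem.Dict.empty k,
    show (PySem.Dict.empty : PySem.Dict κ (PySem.Set Int)).getD k PySem.Set.empty
      = PySem.Set.empty from rfl,
    show PySem.Set.update (PySem.Set.empty : PySem.Set Int)
        (((l.filter (fun kv => kv.1 == k))).map (·.2))
      = PySem.Set.ofList (((l.filter (fun kv => kv.1 == k))).map (·.2))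
      from (PySem.Set.ofList_eq_foldl _).symm]
  exact PySem.Set.nodup_ofList _

theorem pvUpd_keys {κ : Type} [BEq κ] [LawfulBEq κ] (l : List (κ × Int)) :
    (l.foldl (fun d kv => d.insert kv.1 (PySem.Set.add (d.getD kv.1 PySem.Set.empty) kv.2))
        (PySem.Dict.empty : PySem.Dict κ (PySem.Set Int))).keys
    = PySem.Set.ofList (l.map (·.1)) := by
  have h := PySem.Dict.keys_foldl_insert_key l (fun kv => kv.1)
    (fun d kv => PySem.Set.add (d.getD kv.1 PySem.Set.empty) kv.2)
    (PySem.Dict.empty : PySem.Dict κ (PySem.Set Int))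
  rw [PySem.Set.ofList_eq_foldl]
  exact h

theorem pvUpd_keys_nodup {κ : Type} [BEq κ] [LawfulBEq κ] (l : List (κ × Int)) :
    (l.foldl (fun d kv => d.insert kv.1 (PySem.Set.add (d.getD kv.1 PySem.Set.empty) kv.2))
        (PySem.Dict.empty : PySem.Dict κ (PySem.Set Int))).keys.Nodup := by
  rw [pvUpd_keys l]
  exact PySem.Set.nodup_ofList _

theorem pvPoly_eq (polygons : List (List (Int × Int))) (m : Nat) (hm : m < polygons.length) :
    pvPoly polygons ↑m = polygons[m] := by
  simp [pvPoly, PySem.List.pyGetD_natCast, List.getD_eq_getElem?_getD, hm]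

theorem pvPairs_mem (polygons : List (List (Int × Int))) (k : (Int × Int) × (Int × Int)) (i : Int) :
    ((k, i) ∈ pvPairs polygons) ↔ (0 ≤ i ∧ i < (polygons.length : Int) ∧
      ∃ e ∈ pvEdgeList (pvPoly polygons i), pvNormKey e.1 e.2 = k) := by
  unfold pvPairs
  rw [List.mem_flatMap]
  constructor
  · rintro ⟨p, hp, hmem⟩
    rw [List.mem_map] at hmem
    obtain ⟨e, he, hpair⟩ := hmem
    obtain ⟨m, hm, rfl⟩ := (PySem.List.mem_enumerate_iff polygons 0 p).1 hp
    injection hpair with h1 h2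
    have h2' : (0 : Int) + ↑m = i := h2
    have hm' : (0:Int) ≤ ↑m ∧ (↑m : Int) < ↑polygons.length := by
      constructor
      · positivity
      · exact_mod_cast hm
    refine ⟨by omega, by omega, e, ?_, h1⟩
    rw [show pvPoly polygons i = polygons[m] by rw [← h2', zero_add]; exact pvPoly_eq polygons m hm]
    exact he
  · rintro ⟨h0, hlt, e, he, hk⟩
    obtain ⟨m, rfl⟩ := Int.eq_ofNat_of_zero_le h0
    have hm : m < polygons.length := by exact_mod_cast hlt
    refine ⟨(↑m, polygons[m]), ?_, ?_⟩
    · rw [PySem.List.mem_enumerate_iff]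
      exact ⟨m, hm, by rw [zero_add]⟩
    · rw [List.mem_map]
      refine ⟨e, ?_, ?_⟩
      · rw [show ((↑m : Int), polygons[m]).2 = polygons[m] from rfl, ← pvPoly_eq polygons m hm]
        exact he
      · show (pvNormKey e.1 e.2, (↑m : Int)) = (k, ↑m)
        rw [hk]

theorem pvSharesIff (polygons : List (List (Int × Int))) (i j : Int) :
    (pvSharesB polygons i j = true) ↔ ∃ e1 ∈ pvEdgeList (pvPoly polygons i),
      ∃ e2 ∈ pvEdgeList (pvPoly polygons j), pvNormKey e1.1 e1.2 = pvNormKey e2.1 e2.2 := by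
  simp [pvSharesB, List.any_eq_true]

theorem pvNbr_mem (polygons : List (List (Int × Int))) (i j : Int) :
    (j ∈ pvNbr polygons i) ↔ (0 ≤ j ∧ j < (polygons.length : Int) ∧ i ≠ j ∧
      pvSharesB polygons i j = true) := by
  unfold pvNbr
  rw [List.mem_filter, PySem.List.mem_pyRange_one, Bool.and_eq_true, decide_eq_true_eq]
  tauto

theorem pvFilter_map_eq_filterMap (f : Int → List Int) :
    ∀ (l : List Int),
    (l.filter (fun i => !decide (f i = []))).map (fun i => (i, f i))
    = l.filterMap (fun i => if f i = [] then none else some (i, f i)) := by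
  intro l
  induction l with
  | nil => simp
  | cons a t ih => by_cases h : f a = [] <;> simp [h, ih]

theorem pvB_eq (polygons : List (List (Int × Int))) :
    build_adjacency_graph_alt polygons = pvSpec polygons := by
  -- name the two folded structures of port B (the let-bound edge_map and neighbors)
  have hport : build_adjacency_graph_alt polygons =
    (PySem.List.sorted (((((PySem.List.enumerate polygons).foldl (fun em p =>
      (PySem.List.pyRange 0 p.2.length 1).foldl (fun em k =>
        let a := PySem.List.pyGetD p.2 k (0, 0)
        let b := PySem.List.pyGetD p.2 (PySem.Int.mod (k + 1) p.2.length) (0, 0)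
        let key := pvNormKey a b
        em.insert key (PySem.Set.add (em.getD key PySem.Set.empty) p.1)) em)
      (PySem.Dict.empty : PySem.Dict ((Int × Int) × (Int × Int)) (PySem.Set Int))).values.foldl
        (fun nb group => group.foldl (fun nb i => group.foldl (fun nb j =>
          if i ≠ j then nb.insert i (PySem.Set.add (nb.getD i PySem.Set.empty) j) else nb) nb) nb)
        (PySem.Dict.empty : PySem.Dict Int (PySem.Set Int))).keys)) (fun x => x) false).map
      (fun i => (i, PySem.List.sorted ((((PySem.List.enumerate polygons).foldl (fun em p =>
        (PySem.List.pyRange 0 p.2.length 1).foldl (fun em k =>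
          let a := PySem.List.pyGetD p.2 k (0, 0)
          let b := PySem.List.pyGetD p.2 (PySem.Int.mod (k + 1) p.2.length) (0, 0)
          let key := pvNormKey a b
          em.insert key (PySem.Set.add (em.getD key PySem.Set.empty) p.1)) em)
        (PySem.Dict.empty : PySem.Dict ((Int × Int) × (Int × Int)) (PySem.Set Int))).values.foldl
          (fun nb group => group.foldl (fun nb i => group.foldl (fun nb j =>
            if i ≠ j then nb.insert i (PySem.Set.add (nb.getD i PySem.Set.empty) j) else nb) nb) nb)
          (PySem.Dict.empty : PySem.Dict Int (PySem.Set Int))).getD i PySem.Set.empty)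
        (fun x => x) false)) := rfl
  rw [hport]
  -- Step 1: edge_map is the flat fold over pvPairs
  have hfun : (fun (em : PySem.Dict ((Int × Int) × (Int × Int)) (PySem.Set Int)) (p : Int × List (Int × Int)) =>
      (PySem.List.pyRange 0 p.2.length 1).foldl (fun em k =>
        let a := PySem.List.pyGetD p.2 k (0, 0)
        let b := PySem.List.pyGetD p.2 (PySem.Int.mod (k + 1) p.2.length) (0, 0)
        let key := pvNormKey a b
        em.insert key (PySem.Set.add (em.getD key PySem.Set.empty) p.1)) em)
    = (fun em p => ((pvEdgeList p.2).map (fun e => (pvNormKey e.1 e.2, p.1))).foldl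
        (fun d kv => d.insert kv.1 (PySem.Set.add (d.getD kv.1 PySem.Set.empty) kv.2)) em) := by
    funext em p
    rw [pvEdgeList, List.map_map, List.foldl_map]
    rfl
  have hem : ((PySem.List.enumerate polygons).foldl (fun em p =>
      (PySem.List.pyRange 0 p.2.length 1).foldl (fun em k =>
        let a := PySem.List.pyGetD p.2 k (0, 0)
        let b := PySem.List.pyGetD p.2 (PySem.Int.mod (k + 1) p.2.length) (0, 0)
        let key := pvNormKey a b
        em.insert key (PySem.Set.add (em.getD key PySem.Set.empty) p.1)) em)
      (PySem.Dict.empty : PySem.Dict ((Int × Int) × (Int × Int)) (PySem.Set Int)))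
    = (pvPairs polygons).foldl
        (fun d kv => d.insert kv.1 (PySem.Set.add (d.getD kv.1 PySem.Set.empty) kv.2))
        PySem.Dict.empty := by
    rw [hfun, pvPairs, List.foldl_flatMap]
  rw [hem]
  -- abbreviate the edge_map value
  set EM := (pvPairs polygons).foldl
      (fun d kv => d.insert kv.1 (PySem.Set.add (d.getD kv.1 PySem.Set.empty) kv.2))
      (PySem.Dict.empty : PySem.Dict ((Int × Int) × (Int × Int)) (PySem.Set Int)) with hEMdef
  -- Step 2: neighbors is the flat fold over the filtered pair list Q
  have hnb : (EM.values.foldl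
      (fun nb group => group.foldl (fun nb i => group.foldl (fun nb j =>
        if i ≠ j then nb.insert i (PySem.Set.add (nb.getD i PySem.Set.empty) j) else nb) nb) nb)
      (PySem.Dict.empty : PySem.Dict Int (PySem.Set Int)))
    = ((EM.values.flatMap (fun g => g.flatMap (fun i => g.map (fun j => (i, j))))).filter
        (fun ij => decide (ij.1 ≠ ij.2))).foldl
        (fun d kv => d.insert kv.1 (PySem.Set.add (d.getD kv.1 PySem.Set.empty) kv.2))
        PySem.Dict.empty := by
    rw [List.foldl_filter]
    simp only [List.foldl_flatMap, List.foldl_map, decide_eq_true_eq]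
  rw [hnb]
  set Q := ((EM.values.flatMap (fun g => g.flatMap (fun i => g.map (fun j => (i, j))))).filter
      (fun ij => decide (ij.1 ≠ ij.2))) with hQdef
  set NB := Q.foldl
      (fun d kv => d.insert kv.1 (PySem.Set.add (d.getD kv.1 PySem.Set.empty) kv.2))
      (PySem.Dict.empty : PySem.Dict Int (PySem.Set Int)) with hNBdef
  -- characterizations of EM
  have hEMkeys := pvUpd_keys (pvPairs polygons)
  rw [← hEMdef] at hEMkeys
  have hEMknd := pvUpd_keys_nodup (pvPairs polygons)
  rw [← hEMdef] at hEMknd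
  have hEMvals := PySem.Dict.values_eq_map_keys EM hEMknd PySem.Set.empty
  have hEMmem : ∀ k i, (i ∈ EM.getD k PySem.Set.empty) ↔ ((k, i) ∈ pvPairs polygons) := by
    intro k i
    rw [hEMdef]
    exact pvUpd_getD_mem (pvPairs polygons) k i
  -- two polygons lie in a common bucket iff they are in range and share an edge
  have hgrp : ∀ i j : Int, (∃ g ∈ EM.values, i ∈ g ∧ j ∈ g) ↔
      ∃ k, (k, i) ∈ pvPairs polygons ∧ (k, j) ∈ pvPairs polygons := by
    intro i j
    constructor
    · rintro ⟨g, hg, hi, hj⟩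
      rw [hEMvals, List.mem_map] at hg
      obtain ⟨k, hk, rfl⟩ := hg
      exact ⟨k, (hEMmem k i).1 hi, (hEMmem k j).1 hj⟩
    · rintro ⟨k, hki, hkj⟩
      refine ⟨EM.getD k PySem.Set.empty, ?_, (hEMmem k i).2 hki, (hEMmem k j).2 hkj⟩
      rw [hEMvals, List.mem_map]
      refine ⟨k, ?_, rfl⟩
      rw [hEMkeys, PySem.Set.mem_ofList, List.mem_map]
      exact ⟨(k, i), hki, rfl⟩
  have hshares : ∀ i j : Int, (∃ k, (k, i) ∈ pvPairs polygons ∧ (k, j) ∈ pvPairs polygons) ↔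
      (0 ≤ i ∧ i < (polygons.length : Int) ∧ 0 ≤ j ∧ j < (polygons.length : Int) ∧
        pvSharesB polygons i j = true) := by
    intro i j
    constructor
    · rintro ⟨k, hki, hkj⟩
      obtain ⟨h0i, hi, e1, he1, hk1⟩ := (pvPairs_mem polygons k i).1 hki
      obtain ⟨h0j, hj, e2, he2, hk2⟩ := (pvPairs_mem polygons k j).1 hkj
      exact ⟨h0i, hi, h0j, hj, (pvSharesIff polygons i j).2 ⟨e1, he1, e2, he2, hk1.trans hk2.symm⟩⟩
    · rintro ⟨h0i, hi, h0j, hj, hs⟩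
      obtain ⟨e1, he1, e2, he2, hk⟩ := (pvSharesIff polygons i j).1 hs
      exact ⟨pvNormKey e1.1 e1.2,
        (pvPairs_mem polygons _ i).2 ⟨h0i, hi, e1, he1, rfl⟩,
        (pvPairs_mem polygons _ j).2 ⟨h0j, hj, e2, he2, hk.symm⟩⟩
  -- membership in Q
  have hQ : ∀ i j : Int, ((i, j) ∈ Q) ↔
      (0 ≤ i ∧ i < (polygons.length : Int) ∧ j ∈ pvNbr polygons i) := by
    intro i j
    rw [hQdef, List.mem_filter]
    constructor
    · rintro ⟨hf, hne⟩
      rw [List.mem_flatMap] at hf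
      obtain ⟨g, hg, hf⟩ := hf
      rw [List.mem_flatMap] at hf
      obtain ⟨i', hi', hf⟩ := hf
      rw [List.mem_map] at hf
      obtain ⟨j', hj', hpair⟩ := hf
      injection hpair with e1 e2
      subst e1
      subst e2
      have hsh := (hshares i' j').1 ((hgrp i' j').1 ⟨g, hg, hi', hj'⟩)
      simp only [decide_eq_true_eq] at hne
      exact ⟨hsh.1, hsh.2.1,
        (pvNbr_mem polygons i' j').2 ⟨hsh.2.2.1, hsh.2.2.2.1, hne, hsh.2.2.2.2⟩⟩
    · rintro ⟨h0i, hiP, hjn⟩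
      obtain ⟨h0j, hjP, hne, hs⟩ := (pvNbr_mem polygons i j).1 hjn
      obtain ⟨k, hki, hkj⟩ := (hshares i j).2 ⟨h0i, hiP, h0j, hjP, hs⟩
      obtain ⟨g, hg, hi, hj⟩ := (hgrp i j).2 ⟨k, hki, hkj⟩
      refine ⟨?_, by simpa using hne⟩
      rw [List.mem_flatMap]
      exact ⟨g, hg, by
        rw [List.mem_flatMap]
        exact ⟨i, hi, by rw [List.mem_map]; exact ⟨j, hj, rfl⟩⟩⟩
  -- characterizations of NB
  have hkeys := pvUpd_keys Q
  rw [← hNBdef] at hkeys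
  have hkeysnd := pvUpd_keys_nodup Q
  rw [← hNBdef] at hkeysnd
  have hmem : ∀ i j : Int, (j ∈ NB.getD i PySem.Set.empty) ↔ ((i, j) ∈ Q) := by
    intro i j
    rw [hNBdef]
    exact pvUpd_getD_mem Q i j
  have hgdnd : ∀ i : Int, (NB.getD i PySem.Set.empty).Nodup := by
    intro i
    rw [hNBdef]
    exact pvUpd_getD_nodup Q i
  have hkeyiff : ∀ i : Int, (i ∈ NB.keys) ↔
      (0 ≤ i ∧ i < (polygons.length : Int) ∧ pvNbr polygons i ≠ []) := by
    intro i
    rw [hkeys, PySem.Set.mem_ofList, List.mem_map]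
    constructor
    · rintro ⟨⟨i', j⟩, hq, rfl⟩
      have h := (hQ i' j).1 hq
      exact ⟨h.1, h.2.1, fun hnil => (List.not_mem_nil) (hnil ▸ h.2.2)⟩
    · rintro ⟨h0, hP, hne⟩
      obtain ⟨j, hj⟩ := List.exists_mem_of_ne_nil _ hne
      exact ⟨(i, j), (hQ i j).2 ⟨h0, hP, hj⟩, rfl⟩
  -- sorted keys are the in-range indices with nonempty neighbor lists
  have hK : PySem.List.sorted NB.keys (fun x => x) false
      = (PySem.List.pyRange 0 (polygons.length : Int) 1).filter
          (fun i => !decide (pvNbr polygons i = [])) := by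
    apply PySem.List.sorted_eq_of_perm_of_pairwise_lt
    · rw [List.perm_ext_iff_of_nodup
        ((PySem.List.nodup_pyRange_one 0 (polygons.length : Int)).filter _) hkeysnd]
      intro a
      rw [List.mem_filter, PySem.List.mem_pyRange_one, hkeyiff a]
      simp only [Bool.not_eq_true', decide_eq_false_iff_not]
      tauto
    · exact (PySem.List.pairwise_lt_pyRange_one 0 (polygons.length : Int)).filter _
  -- each sorted bucket is the corresponding neighbor list
  have hvals : ∀ i ∈ (PySem.List.pyRange 0 (polygons.length : Int) 1).filter
      (fun i => !decide (pvNbr polygons i = [])),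
      PySem.List.sorted (NB.getD i PySem.Set.empty) (fun x => x) false = pvNbr polygons i := by
    intro i hi
    rw [List.mem_filter, PySem.List.mem_pyRange_one] at hi
    apply PySem.List.sorted_eq_of_perm_of_pairwise_lt
    · refine (List.perm_ext_iff_of_nodup
        (by unfold pvNbr
            exact (PySem.List.nodup_pyRange_one 0 (polygons.length : Int)).filter _)
        (hgdnd i)).2 ?_
      intro j
      rw [hmem i j, hQ i j]
      constructor
      · intro h
        exact ⟨hi.1.1, hi.1.2, h⟩
      · intro h
        exact h.2.2
    · unfold pvNbr
      exact (PySem.List.pairwise_lt_pyRange_one 0 (polygons.length : Int)).filter _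
  rw [hK, List.map_congr_left (fun i hi => by rw [hvals i hi])]
  rw [pvFilter_map_eq_filterMap (fun i => pvNbr polygons i)
    (PySem.List.pyRange 0 (polygons.length : Int) 1)]
  rfl

-- ===== VERDICT (by name: the statement is the Claim_ definition above) =====
theorem build_adjacency_graph_spec : Claim_equal_build_adjacency_graph := by
  intro polygons _
  unfold Spec_build_adjacency_graph
  rw [pvA_eq, pvB_eq]
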